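-- pv_equiv track=rewrite | github.com/BartaZoltan/deep-reinforcement-learning-course | scripts/generate_student_version.py | _strip_between_delimiters
-- ===== SOURCE A (Python) =====
-- def _is_delimiter_line(line: str, delimiter: str) -> bool:
--     return line.strip() == delimiter
--
-- def _blank_like(line: str) -> str:
--     return "\n" if line.endswith("\n") else ""
--
-- def _strip_between_delimiters(lines: list[str], delimiter: str) -> tuple[list[str], int]:
--     in_block = False
--     blanked = 0
--     output: list[str] = []
--
--     for line in lines:
--         if _is_delimiter_line(line, delimiter):
--             in_block = not in_block
--             output.append(line)
--             continue
--
--         if in_block: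
--             output.append(_blank_like(line))
--             blanked += 1
--         else:
--             output.append(line)
--
--     if in_block:
--         raise ValueError("Unmatched delimiter: found an opening delimiter without a closing pair.")
--
--     return output, blanked
-- ===== SOURCE B (Python) =====
-- def _find_delim(rest, delimiter):
--     for k, line in enumerate(rest):
--         if line.strip() == delimiter:
--             return k
--     return None
--
-- def _strip_between_delimiters(lines, delimiter):
--     output = []
--     blanked = 0
--     rest = lines
--     while True:
--         j = _find_delim(rest, delimiter)
--         if j is None:
--             output.extend(rest)
--             return output, blanked
--         output.extend(rest[:j + 1])
--         rest = rest[j + 1:]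
--         q = _find_delim(rest, delimiter)
--         if q is None:
--             raise ValueError("Unmatched delimiter: found an opening delimiter without a closing pair.")
--         output.extend("\n" if line.endswith("\n") else "" for line in rest[:q])
--         output.append(rest[q])
--         blanked += q
--         rest = rest[q + 1:]
-- ===== Notes on version B (the rewrite author's own statement) =====
-- stated objective: alternative
-- what changed: replaced the per-line boolean-toggle pass by a search-and-split loop: find the next pair of delimiter positions, copy the outside segment wholesale, blank the inside segment as a slice, repeat on the remainder
import Mathlib
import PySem

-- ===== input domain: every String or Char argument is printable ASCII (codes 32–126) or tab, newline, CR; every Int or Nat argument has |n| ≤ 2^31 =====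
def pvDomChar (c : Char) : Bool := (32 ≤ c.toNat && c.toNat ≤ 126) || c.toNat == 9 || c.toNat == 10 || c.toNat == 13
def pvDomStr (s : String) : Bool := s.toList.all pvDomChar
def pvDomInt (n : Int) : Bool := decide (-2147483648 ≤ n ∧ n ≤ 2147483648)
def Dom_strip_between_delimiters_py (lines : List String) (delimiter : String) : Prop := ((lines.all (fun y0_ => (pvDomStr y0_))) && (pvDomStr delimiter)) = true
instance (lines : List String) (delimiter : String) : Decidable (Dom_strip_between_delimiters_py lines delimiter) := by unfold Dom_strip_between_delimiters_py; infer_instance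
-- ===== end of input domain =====

-- B replaces A's per-line boolean-toggle pass by a search-and-split loop over delimiter positions
-- (same cost; a different decomposition). Equivalence of the RETURN value is proved on Pre_.

-- ===== PORT A =====
def isDelimiterLine (line delimiter : String) : Bool := PySem.Str.strip line == delimiter

def blankLike (line : String) : String := if PySem.Str.endswith line "\n" then "\n" else ""

def stepA (delimiter : String) (st : Bool × Int × List String) (line : String) : Bool × Int × List String :=
  if isDelimiterLine line delimiter then (!st.1, st.2.1, st.2.2 ++ [line])
  else if st.1 then (st.1, st.2.1 + 1, st.2.2 ++ [blankLike line])
  else (st.1, st.2.1, st.2.2 ++ [line])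

-- if the final in_block is true Python raises ValueError: excluded by Pre_ below
def strip_between_delimiters_py (lines : List String) (delimiter : String) : List String × Int :=
  let st := lines.foldl (stepA delimiter) (false, 0, [])
  (st.2.2, st.2.1)

-- ===== PORT B =====
def findDelim (rest : List String) (delimiter : String) : Option Nat :=
  match rest with
  | [] => none
  | line :: tl =>
      if PySem.Str.strip line == delimiter then some 0
      else (findDelim tl delimiter).map (· + 1)

-- termination helper for goB (cited by decreasing_by)
theorem findDelim_some_lt {rest : List String} {d : String} {j : Nat}
    (h : findDelim rest d = some j) : j < rest.length := by
  induction rest generalizing j with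
  | nil => simp [findDelim] at h
  | cons a tl ih =>
      simp only [findDelim] at h
      split at h
      · simp at h; subst h; simp
      · cases hh : findDelim tl d with
        | none => rw [hh] at h; simp at h
        | some k => rw [hh] at h; simp at h; subst h; have := ih hh; simp; omega

def goB (d : String) (rest : List String) (output : List String) (blanked : Int) : List String × Int :=
  match h : findDelim rest d with
  | none => (output ++ rest, blanked)
  | some j =>
    let rest' := rest.drop (j + 1)
    let output' := output ++ rest.take (j + 1)
    match findDelim rest' d with
    | none => (output', blanked)  -- Python raises ValueError here; outside Pre_
    | some q =>
        goB d (rest'.drop (q + 1))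
          (output' ++ (rest'.take q).map blankLike ++ [rest'.getD q ""])
          (blanked + q)
termination_by rest.length
decreasing_by
  have := findDelim_some_lt h
  simp only [List.length_drop]
  omega

def strip_between_delimiters_py_alt (lines : List String) (delimiter : String) : List String × Int :=
  goB delimiter lines [] 0

-- ===== PRECONDITION & SPEC =====
-- Pre_ excludes inputs with an odd number of delimiter lines: there A raises ValueError
-- (unmatched delimiter) and returns no value; B raises the same ValueError.
def Pre_strip_between_delimiters_py (lines : List String) (delimiter : String) : Prop :=
  (lines.countP (fun l => PySem.Str.strip l == delimiter)) % 2 = 0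
instance (lines : List String) (delimiter : String) : Decidable (Pre_strip_between_delimiters_py lines delimiter) := by unfold Pre_strip_between_delimiters_py; infer_instance

def pvWitness_strip_between_delimiters_py : List String × String :=
  (["keep\n", "##\n", "secret\n", " ## ", "tail"], "##")

def Spec_strip_between_delimiters_py (lines : List String) (delimiter : String) (out : List String × Int) : Prop := out = strip_between_delimiters_py_alt lines delimiter
instance (lines : List String) (delimiter : String) (out : List String × Int) : Decidable (Spec_strip_between_delimiters_py lines delimiter out) := by unfold Spec_strip_between_delimiters_py; infer_instance

-- ===== CLAIM (what is proved, stated in full; the proofs are below) =====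
def Claim_equal_strip_between_delimiters_py : Prop := ∀ (lines : List String) (delimiter : String), Dom_strip_between_delimiters_py lines delimiter → Pre_strip_between_delimiters_py lines delimiter → Spec_strip_between_delimiters_py lines delimiter (strip_between_delimiters_py lines delimiter)

-- ===== LEMMAS AND PROOFS =====

-- A's loop over a delimiter-free segment, outside a block: copies it verbatim
theorem foldl_stepA_false {d : String} {pre : List String} {b : Int} {out : List String}
    (h : ∀ l ∈ pre, (PySem.Str.strip l == d) = false) :
    pre.foldl (stepA d) (false, b, out) = (false, b, out ++ pre) := by
  induction pre generalizing out with
  | nil => simp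
  | cons a tl ih =>
      have ha := h a (by simp)
      have hstep : stepA d (false, b, out) a = (false, b, out ++ [a]) := by
        simp [stepA, isDelimiterLine, ha]
      rw [List.foldl_cons, hstep, ih (fun l hl => h l (by simp [hl]))]
      simp

-- A's loop over a delimiter-free segment, inside a block: blanks every line
theorem foldl_stepA_true {d : String} {pre : List String} {b : Int} {out : List String}
    (h : ∀ l ∈ pre, (PySem.Str.strip l == d) = false) :
    pre.foldl (stepA d) (true, b, out) = (true, b + pre.length, out ++ pre.map blankLike) := by
  induction pre generalizing b out with
  | nil => simp
  | cons a tl ih =>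
      have ha := h a (by simp)
      have hstep : stepA d (true, b, out) a = (true, b + 1, out ++ [blankLike a]) := by
        simp [stepA, isDelimiterLine, ha]
      rw [List.foldl_cons, hstep, ih (fun l hl => h l (by simp [hl]))]
      refine Prod.ext rfl (Prod.ext ?_ ?_)
      · simp; ring
      · simp

theorem findDelim_none {rest : List String} {d : String}
    (h : findDelim rest d = none) : ∀ l ∈ rest, (PySem.Str.strip l == d) = false := by
  induction rest with
  | nil => simp
  | cons a tl ih =>
      simp only [findDelim] at h
      split at h
      · simp at h
      · intro l hl
        rcases List.mem_cons.mp hl with rfl | hl'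
        · simpa using ‹¬(PySem.Str.strip l == d) = true›
        · cases hh : findDelim tl d with
          | some k => rw [hh] at h; simp at h
          | none => exact ih hh l hl'

theorem findDelim_some {rest : List String} {d : String} {j : Nat}
    (h : findDelim rest d = some j) :
    j < rest.length ∧ (∀ l ∈ rest.take j, (PySem.Str.strip l == d) = false) ∧
      (PySem.Str.strip (rest.getD j "") == d) = true := by
  induction rest generalizing j with
  | nil => simp [findDelim] at h
  | cons a tl ih =>
      simp only [findDelim] at h
      split at h
      · simp at h
        subst h
        exact ⟨by simp, by simp, by simpa using ‹(PySem.Str.strip a == d) = true›⟩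
      · cases hh : findDelim tl d with
        | none => rw [hh] at h; simp at h
        | some k =>
            rw [hh] at h; simp at h
            obtain ⟨h1, h2, h3⟩ := ih hh
            subst h
            refine ⟨by simp; omega, ?_, by simpa using h3⟩
            intro l hl
            simp only [List.take_succ_cons] at hl
            rcases List.mem_cons.mp hl with rfl | hl'
            · simpa using ‹¬(PySem.Str.strip l == d) = true›
            · exact h2 l hl'

-- the delimiter-position decomposition of a list
theorem split_at_delim {rest : List String} {j : Nat} (hj : j < rest.length) :
    rest = rest.take j ++ rest.getD j "" :: rest.drop (j + 1) := by
  rw [List.getD_eq_getElem rest "" hj]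
  conv_lhs => rw [← List.take_append_drop j rest]
  rw [List.drop_eq_getElem_cons hj]

theorem take_succ_getD {rest : List String} {j : Nat} (hj : j < rest.length) :
    rest.take (j + 1) = rest.take j ++ [rest.getD j ""] := by
  rw [List.getD_eq_getElem rest "" hj, List.take_add_one, List.getElem?_eq_getElem hj]
  rfl

private theorem countP_zero_of_all_false {p : String → Bool} {l : List String}
    (h : ∀ x ∈ l, p x = false) : l.countP p = 0 :=
  List.countP_eq_zero.mpr (by intro x hx; simp [h x hx])

-- MAIN: B's search-and-split loop equals A's toggle loop (stated with fuel n for strong induction)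
theorem goB_eq_foldl (d : String) :
    ∀ (n : Nat) (rest out : List String) (b : Int), rest.length ≤ n →
      (rest.countP (fun l => PySem.Str.strip l == d)) % 2 = 0 →
      goB d rest out b =
        (let st := rest.foldl (stepA d) (false, b, out); (st.2.2, st.2.1)) := by
  intro n
  induction n with
  | zero =>
      intro rest out b hlen _
      have : rest = [] := List.eq_nil_of_length_eq_zero (by omega)
      subst this
      simp [goB, findDelim]
  | succ n ih =>
      intro rest out b hlen hpar
      rw [goB]
      split
      · next h =>
          rw [foldl_stepA_false (findDelim_none h)]
      · next j h =>
          obtain ⟨hj, hpre, hdel⟩ := findDelim_some h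
          have hdel' : PySem.Str.strip (rest[j]?.getD "") = d := by simpa using hdel
          have hsplit := split_at_delim hj
          have htake := take_succ_getD hj
          -- run A's loop up to and through the opening delimiter
          have hfold1 : rest.foldl (stepA d) (false, b, out)
              = (rest.drop (j + 1)).foldl (stepA d) (true, b, out ++ rest.take (j + 1)) := by
            conv_lhs => rw [hsplit]
            rw [List.foldl_append, foldl_stepA_false hpre, List.foldl_cons]
            have hstep : stepA d (false, b, out ++ rest.take j) (rest.getD j "")
                = (true, b, out ++ rest.take j ++ [rest.getD j ""]) := by
              simp [stepA, isDelimiterLine, hdel']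
            rw [hstep, htake, List.append_assoc]
          dsimp only
          split
          · next h2 =>
              -- odd number of delimiters: contradicts the parity hypothesis
              exfalso
              have hc : rest.countP (fun l => PySem.Str.strip l == d)
                  = (rest.take j).countP (fun l => PySem.Str.strip l == d)
                    + (1 + (rest.drop (j + 1)).countP (fun l => PySem.Str.strip l == d)) := by
                conv_lhs => rw [hsplit]
                rw [List.countP_append, List.countP_cons]
                rw [if_pos hdel]
                omega
              rw [countP_zero_of_all_false hpre, countP_zero_of_all_false (findDelim_none h2)] at hc
              omega
          · next q h2 =>
              obtain ⟨hq, hpre2, hdel2⟩ := findDelim_some h2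
              have hdel2' : PySem.Str.strip (rest[j + 1 + q]?.getD "") = d := by simpa using hdel2
              have hsplit2 := split_at_delim hq
              have hlq : ((rest.drop (j + 1)).take q).length = q := by
                simp only [List.length_take, List.length_drop]
                simp only [List.length_drop] at hq
                omega
              -- run A's loop through the blanked segment and the closing delimiter
              have hfold2 : (rest.drop (j + 1)).foldl (stepA d) (true, b, out ++ rest.take (j + 1))
                  = ((rest.drop (j + 1)).drop (q + 1)).foldl (stepA d)
                      (false, b + q, out ++ rest.take (j + 1) ++ ((rest.drop (j + 1)).take q).map blankLike
                        ++ [(rest.drop (j + 1)).getD q ""]) := by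
                conv_lhs => rw [hsplit2]
                rw [List.foldl_append, foldl_stepA_true hpre2, hlq, List.foldl_cons]
                have hstep : stepA d (true, b + q, out ++ rest.take (j + 1) ++ ((rest.drop (j + 1)).take q).map blankLike)
                    ((rest.drop (j + 1)).getD q "")
                    = (false, b + q, out ++ rest.take (j + 1) ++ ((rest.drop (j + 1)).take q).map blankLike
                        ++ [(rest.drop (j + 1)).getD q ""]) := by
                  simp [stepA, isDelimiterLine, hdel2']
                rw [hstep]
              have hpar' : (((rest.drop (j + 1)).drop (q + 1)).countP (fun l => PySem.Str.strip l == d)) % 2 = 0 := by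
                have hc : rest.countP (fun l => PySem.Str.strip l == d)
                    = (rest.take j).countP (fun l => PySem.Str.strip l == d)
                      + (1 + (((rest.drop (j + 1)).take q).countP (fun l => PySem.Str.strip l == d)
                        + (1 + ((rest.drop (j + 1)).drop (q + 1)).countP (fun l => PySem.Str.strip l == d)))) := by
                  conv_lhs => rw [hsplit]
                  rw [List.countP_append, List.countP_cons]
                  conv_lhs => rw [hsplit2]
                  rw [List.countP_append, List.countP_cons]
                  rw [if_pos hdel, if_pos hdel2]
                  omega
                rw [countP_zero_of_all_false hpre, countP_zero_of_all_false hpre2] at hc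
                omega
              have hlen' : ((rest.drop (j + 1)).drop (q + 1)).length ≤ n := by
                simp only [List.length_drop]
                omega
              rw [ih _ _ _ hlen' hpar', hfold1, hfold2]

-- ===== VERDICT (by name: the statement is the Claim_ definition above) =====
theorem strip_between_delimiters_py_spec : Claim_equal_strip_between_delimiters_py := by
  intro lines delimiter _ hpre
  unfold Spec_strip_between_delimiters_py strip_between_delimiters_py strip_between_delimiters_py_alt
  rw [goB_eq_foldl delimiter lines.length lines [] 0 le_rfl hpre]
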